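-- pv_equiv track=rewrite | github.com/gudise/thesis | python/scripts/medir_garomatrix.py | polyNomenclature
-- ===== SOURCE A (Python) =====
-- def printUnicodeExp(numero):
-- 	"""
-- 	Esta función coge un número y lo escribe como un exponente
-- 	utilizando caracteres UNICODE.
-- 	"""
-- 	super_unicode = ["\u2070","\u00B9","\u00B2","\u00B3","\u2074","\u2075","\u2076","\u2077","\u2078","\u2079"]
-- 	result=""
-- 	aux=[]
-- 	while numero>0:
-- 		aux.append(numero%10)
-- 		numero//=10
-- 	aux.reverse()
-- 	result=""
-- 	for i in aux:
-- 		result+=super_unicode[i]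
-- 	return result
--
-- def polyNomenclature(entrada):
-- 	"""
-- 	Esta función toma un array 'poly' tal y como se utilizando
-- 	en este script para representar un polinomio de Galois, y
-- 	lo escribe en forma de polinomio tal y como se escribe
-- 	en el paper de Golic.
-- 	"""
--
-- 	N=len(entrada)+1
-- 	result="1"
-- 	for i in range(1, N):
-- 		if entrada[-i]:
-- 			if i==1:
-- 				result+="+x"
-- 			else:
-- 				result+=f"+x{printUnicodeExp(i)}"
-- 	if N==1:
-- 		result+="+x"
-- 	else:
-- 		result+=f"+x{printUnicodeExp(N)}"
--
-- 	return result
-- ===== SOURCE B (Python) =====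
-- def polyNomenclature(entrada):
--     SUP = '\u2070\u00B9\u00B2\u00B3\u2074\u2075\u2076\u2077\u2078\u2079'
--     n = len(entrada)
--     exps = [n - j for j, c in enumerate(entrada) if c]
--     exps.reverse()
--     exps.append(n + 1)
--
--     def term(e):
--         return 'x' if e == 1 else 'x' + ''.join(SUP[ord(d) - 48] for d in str(e))
--
--     return '+'.join(['1'] + [term(e) for e in exps])
-- ===== Notes on version B (the rewrite author's own statement) =====
-- stated objective: alternative
-- what changed: B scans the input FORWARD collecting descending exponents len-j into a list, reverses it, appends the final exponent, and renders with '+'.join over a rendering helper that maps the decimal string str(e) through a superscript character table (indexing by ord(d)-48), instead of A's backward range(1,N) scan with negative indexing, += string accumulation and a while-modulo digit-peeling helper.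
import Mathlib
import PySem

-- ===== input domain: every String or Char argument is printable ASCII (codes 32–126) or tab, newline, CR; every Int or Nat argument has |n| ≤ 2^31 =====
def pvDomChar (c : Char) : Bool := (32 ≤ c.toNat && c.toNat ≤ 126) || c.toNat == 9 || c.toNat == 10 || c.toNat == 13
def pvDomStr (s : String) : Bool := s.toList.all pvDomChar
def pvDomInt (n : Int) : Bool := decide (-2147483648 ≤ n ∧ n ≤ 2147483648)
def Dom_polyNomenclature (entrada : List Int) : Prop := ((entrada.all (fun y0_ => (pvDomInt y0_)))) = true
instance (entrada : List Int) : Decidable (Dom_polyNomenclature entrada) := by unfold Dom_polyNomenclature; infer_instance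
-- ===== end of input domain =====

-- B replaces A's backward range(1,N) scan with negative indexing and while-modulo digit
-- peeling by a forward scan that collects descending exponents, reverses them, appends the
-- final exponent, renders each term by translating str(e) through a superscript character
-- table, and assembles the result with '+'.join (objective: alternative; same output).

-- ===== PORT A =====

def pvSuperUnicode : List String :=
  ["\u2070","\u00B9","\u00B2","\u00B3","\u2074","\u2075","\u2076","\u2077","\u2078","\u2079"]

-- while numero > 0: aux.append(numero % 10); numero //= 10
def pvPeel (numero : Int) (aux : List Int) : List Int :=
  if _h : 0 < numero then
    pvPeel (PySem.Int.floordiv numero 10) (aux ++ [PySem.Int.mod numero 10])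
  else aux
termination_by numero.toNat
decreasing_by
  rw [PySem.Int.floordiv_eq_ediv_of_pos (by norm_num)]
  omega

def pvPrintUnicodeExp (numero : Int) : String :=
  let aux := (pvPeel numero []).reverse
  aux.foldl (fun result i => result ++ ((PySem.List.pyGet? pvSuperUnicode i).getD "")) ""

def polyNomenclature (entrada : List Int) : String :=
  let N : Int := (entrada.length : Int) + 1
  let result := "1"
  let result := (PySem.List.pyRange 1 N 1).foldl (fun r i =>
    if ((PySem.List.pyGet? entrada (-i)).getD 0) ≠ 0 then
      if i = 1 then r ++ "+x" else r ++ ("+x" ++ pvPrintUnicodeExp i)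
    else r) result
  if N = 1 then result ++ "+x" else result ++ ("+x" ++ pvPrintUnicodeExp N)

-- ===== PORT B =====

-- SUP as a list of its characters
def pvSupChars : List Char :=
  ['\u2070','\u00B9','\u00B2','\u00B3','\u2074','\u2075','\u2076','\u2077','\u2078','\u2079']

-- SUP[ord(d) - 48]; the index is in range for every decimal digit of a positive integer,
-- which is the only way Source B reaches it, so the .getD default is unreachable
def pvSupOf (d : Char) : Char :=
  (PySem.List.pyGet? pvSupChars ((d.toNat : Int) - 48)).getD '?'

-- term(e) = 'x' if e == 1 else 'x' + ''.join(SUP[ord(d)-48] for d in str(e))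
def pvTerm (e : Int) : String :=
  if e = 1 then "x"
  else "x" ++ String.ofList ((PySem.Int.toStr e).toList.map pvSupOf)

def polyNomenclature_alt (entrada : List Int) : String :=
  let n : Int := (entrada.length : Int)
  let exps := (PySem.List.enumerate entrada 0).filterMap
      (fun p => if p.2 ≠ 0 then some (n - p.1) else none)
  let exps := exps.reverse ++ [n + 1]
  PySem.Str.join "+" ("1" :: exps.map pvTerm)

-- ===== PRECONDITION & SPEC =====
def Spec_polyNomenclature (entrada : List Int) (out : String) : Prop := out = polyNomenclature_alt entrada
instance (entrada : List Int) (out : String) : Decidable (Spec_polyNomenclature entrada out) := by unfold Spec_polyNomenclature; infer_instance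

-- ===== CLAIM (what is proved, stated in full; the proofs are below) =====
def Claim_equal_polyNomenclature : Prop := ∀ (entrada : List Int), Dom_polyNomenclature entrada → Spec_polyNomenclature entrada (polyNomenclature entrada)

-- ===== LEMMAS AND PROOFS =====

-- the while loop of printUnicodeExp produces the little-endian decimal digits
theorem pvPeel_eq (m : Nat) : ∀ acc : List Int,
    pvPeel (m : Int) acc = acc ++ (Nat.digits 10 m).map Int.ofNat := by
  induction m using Nat.strong_induction_on with
  | _ m ih =>
    intro acc
    rw [pvPeel]
    by_cases hm : 0 < m
    · have hcast : (0 : Int) < (m : Int) := by exact_mod_cast hm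
      rw [dif_pos hcast]
      have hfd : PySem.Int.floordiv (m : Int) 10 = ((m / 10 : Nat) : Int) := by
        exact_mod_cast PySem.Int.floordiv_natCast m 10
      have hmd : PySem.Int.mod (m : Int) 10 = ((m % 10 : Nat) : Int) := by
        exact_mod_cast PySem.Int.mod_natCast m 10
      rw [hfd, hmd, ih (m / 10) (Nat.div_lt_self hm (by norm_num))]
      rw [Nat.digits_def' (by norm_num : 1 < 10) hm]
      simp
    · have : ¬ (0 : Int) < (m : Int) := by exact_mod_cast hm
      rw [dif_neg this]
      have : m = 0 := by omega
      simp [this]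

theorem toDigitsCore_eq (fuel : Nat) : ∀ (n : Nat) (l : List Char), 0 < n → n < fuel →
    Nat.toDigitsCore 10 fuel n l = ((Nat.digits 10 n).map Nat.digitChar).reverse ++ l := by
  induction fuel with
  | zero => intro n l h1 h2; omega
  | succ f ih =>
    intro n l h1 h2
    rw [Nat.toDigitsCore]
    rw [Nat.digits_def' (by norm_num : 1 < 10) h1]
    by_cases hd : n / 10 = 0
    · simp [hd]
    · have hlt : n / 10 < f := by
        have := Nat.div_lt_self h1 (by norm_num : 1 < 10)
        omega
      simp only [hd, if_false]
      rw [ih (n / 10) _ (Nat.pos_of_ne_zero hd) hlt]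
      simp

theorem toDigits_eq (m : Nat) (h : 0 < m) :
    Nat.toDigits 10 m = ((Nat.digits 10 m).map Nat.digitChar).reverse := by
  rw [Nat.toDigits, toDigitsCore_eq (m + 1) m [] h (by omega)]
  simp

-- A's superscript table lookup at a digit agrees with B's SUP[ord(d)-48] at its digit char
theorem pyGet_super (d : Nat) (hd : d < 10) :
    (PySem.List.pyGet? pvSuperUnicode (Int.ofNat d)).getD "" =
      String.ofList [pvSupOf (Nat.digitChar d)] := by
  interval_cases d <;> decide

theorem foldl_super (ds : List Nat) : ∀ s : String, (∀ d ∈ ds, d < 10) →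
    (ds.map Int.ofNat).foldl (fun r i => r ++ ((PySem.List.pyGet? pvSuperUnicode i).getD "")) s
      = s ++ String.ofList (ds.map (fun d => pvSupOf (Nat.digitChar d))) := by
  induction ds with
  | nil => intro s _; apply String.ext; simp
  | cons d ds ih =>
    intro s h
    simp only [List.map_cons, List.foldl_cons]
    rw [pyGet_super d (h d (by simp)), ih _ (fun x hx => h x (by simp [hx]))]
    apply String.ext
    simp

-- the unified term string: A's i==1 special case and printUnicodeExp agree with "+" ++ B's term
theorem term_eq (i : Int) (h : 1 ≤ i) :
    (if i = 1 then "+x" else "+x" ++ pvPrintUnicodeExp i) = "+" ++ pvTerm i := by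
  by_cases h1 : i = 1
  · subst h1
    apply String.ext
    simp [pvTerm]
  · rw [if_neg h1]
    have hm : 0 < i.toNat := by omega
    have hii : (i.toNat : Int) = i := by omega
    rw [pvPrintUnicodeExp, pvTerm, if_neg h1]
    have hpeel := pvPeel_eq i.toNat []
    rw [hii] at hpeel
    simp only [hpeel, List.nil_append]
    have hdig : ∀ d ∈ (Nat.digits 10 i.toNat).reverse, d < 10 := by
      intro d hd
      exact Nat.digits_lt_base (by norm_num) (List.mem_reverse.mp hd)
    rw [← List.map_reverse, foldl_super _ "" hdig]
    have htl : (PySem.Int.toStr i).toList = PySem.Int.toChars i := PySem.Int.toList_toStr i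
    rw [htl]
    have hch : PySem.Int.toChars i = Nat.toDigits 10 i.toNat := by
      unfold PySem.Int.toChars
      rw [if_neg (by omega)]
    rw [hch, toDigits_eq i.toNat hm]
    apply String.ext
    simp [List.map_reverse, Function.comp]

-- reading entrada[-i] (1 ≤ i ≤ len) is reading entrada.reverse at position i-1
theorem negIndex_eq (entrada : List Int) (i : Int) (h1 : 1 ≤ i) (h2 : i ≤ entrada.length) :
    (PySem.List.pyGet? entrada (-i)).getD 0 = entrada.reverse.getD (i - 1).toNat 0 := by
  have hk : i = ((i.toNat : Nat) : Int) := by omega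
  rw [hk, PySem.List.pyGet?_neg_natCast entrada i.toNat (by omega) (by omega)]
  rw [List.getD_eq_getElem?_getD]
  have hlt2 : ((i.toNat : Int) - 1).toNat < entrada.length := by omega
  rw [List.getElem?_reverse (by simpa using hlt2)]
  have hidx : entrada.length - 1 - ((i.toNat : Int) - 1).toNat = entrada.length - i.toNat := by
    omega
  rw [hidx]

theorem join_cons (t : String) (ts : List String) : String.join (t :: ts) = t ++ String.join ts := by
  have key : ∀ (l : List String) (s : String), l.foldl (fun r x => r ++ x) s = s ++ l.foldl (fun r x => r ++ x) "" := by
    intro l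
    induction l with
    | nil => intro s; apply String.ext; simp
    | cons x xs ih =>
      intro s
      simp only [List.foldl_cons]
      rw [ih (s ++ x), ih (("" : String) ++ x)]
      apply String.ext
      simp
  simp only [String.join, List.foldl_cons]
  rw [key]
  apply String.ext
  simp

theorem join_append_one (l : List String) (t : String) :
    String.join (l ++ [t]) = String.join l ++ t := by
  induction l with
  | nil =>
    rw [List.nil_append, join_cons]
    apply String.ext
    simp [String.join]
  | cons a as ih =>
    rw [List.cons_append, join_cons, ih, join_cons]
    apply String.ext
    simp

-- '+'.join(s :: l) builds s followed by '+'-prefixed copies of the rest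
theorem joinPlus (l : List String) : ∀ s : String,
    PySem.Str.join "+" (s :: l) = s ++ String.join (l.map (fun t => "+" ++ t)) := by
  induction l with
  | nil =>
    intro s
    apply String.ext
    simp [PySem.Str.toList_join, PySem.Chars.join_singleton, String.join]
  | cons t ts ih =>
    intro s
    have h1 : PySem.Str.join "+" (s :: t :: ts) = (s ++ "+") ++ PySem.Str.join "+" (t :: ts) := by
      apply String.ext
      simp [PySem.Str.toList_join, PySem.Chars.join_cons_cons]
    rw [h1, ih t, List.map_cons, join_cons]
    apply String.ext
    simp

-- the main loop over range(1, N) equals the joined filtered comprehension over enumerate(reversed, 1)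
theorem main_loop (rev : List Int) : ∀ (s : Int) (r : String), 1 ≤ s →
    (PySem.List.pyRange s (s + rev.length) 1).foldl
        (fun r i => if rev.getD (i - s).toNat 0 ≠ 0 then r ++ ("+" ++ pvTerm i) else r) r
      = r ++ String.join ((PySem.List.enumerate rev s).filterMap
          (fun p => if p.2 ≠ 0 then some ("+" ++ pvTerm p.1) else none)) := by
  induction rev with
  | nil =>
    intro s r _
    rw [PySem.List.pyRange_one_eq_nil (by simp)]
    simp [PySem.List.enumerate_nil, String.join]
  | cons a rest ih =>
    intro s r hs
    rw [PySem.List.pyRange_one_cons (by simp)]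
    simp only [List.foldl_cons]
    have hstep : (PySem.List.pyRange (s+1) (s + ((a :: rest).length : Int)) 1).foldl
        (fun r i => if (a :: rest).getD (i - s).toNat 0 ≠ 0 then r ++ ("+" ++ pvTerm i) else r)
        (if (a :: rest).getD ((s:Int) - s).toNat 0 ≠ 0 then r ++ ("+" ++ pvTerm s) else r)
      = (PySem.List.pyRange (s+1) ((s+1) + (rest.length : Int)) 1).foldl
        (fun r i => if rest.getD (i - (s+1)).toNat 0 ≠ 0 then r ++ ("+" ++ pvTerm i) else r)
        (if a ≠ 0 then r ++ ("+" ++ pvTerm s) else r) := by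
      have hrange : s + ((a :: rest).length : Int) = (s+1) + (rest.length : Int) := by
        simp; omega
      rw [hrange]
      have hinit : ((s:Int) - s).toNat = 0 := by omega
      rw [hinit]
      apply PySem.List.foldl_congr_mem
      intro acc i hi
      have hmem := (PySem.List.mem_pyRange_one).mp hi
      have hidx : (i - s).toNat = ((i - (s+1)).toNat) + 1 := by omega
      rw [hidx]
      simp
    simp only [] at hstep
    rw [hstep, ih (s+1) _ (by omega)]
    rw [PySem.List.enumerate_cons]
    simp only [List.filterMap_cons]
    by_cases ha : a ≠ 0
    · simp only [if_pos ha]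
      rw [join_cons]
      apply String.ext
      simp
    · simp only [if_neg ha]

-- B's forward-collected descending exponents, reversed, are the ascending nonzero positions
-- of the reversed list counted from 1
theorem revExps (l : List Int) : ∀ k : Int,
    ((PySem.List.enumerate l k).filterMap
        (fun p => if p.2 ≠ 0 then some ((k + (l.length : Int)) - p.1) else none)).reverse
      = (PySem.List.enumerate l.reverse 1).filterMap
          (fun p => if p.2 ≠ 0 then some p.1 else none) := by
  induction l with
  | nil => intro k; simp [PySem.List.enumerate_nil]
  | cons a t ih =>
    intro k
    rw [PySem.List.enumerate_cons]
    simp only [List.filterMap_cons]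
    have hfun : (fun p : Int × Int => if p.2 ≠ 0 then some ((k + ((a :: t).length : Int)) - p.1) else none)
        = (fun p : Int × Int => if p.2 ≠ 0 then some (((k+1) + (t.length : Int)) - p.1) else none) := by
      funext p
      have : k + ((a :: t).length : Int) = (k+1) + (t.length : Int) := by simp; omega
      rw [this]
    have hrev : (a :: t).reverse = t.reverse ++ [a] := by simp
    rw [hrev, PySem.List.enumerate_append]
    simp only [List.filterMap_append]
    have hsingle : (PySem.List.enumerate [a] (1 + (t.reverse.length : Int))).filterMap
        (fun p : Int × Int => if p.2 ≠ 0 then some p.1 else none)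
      = if a ≠ 0 then [1 + (t.length : Int)] else [] := by
      rw [PySem.List.enumerate_cons, PySem.List.enumerate_nil]
      by_cases ha : a ≠ 0 <;> simp [ha]
    by_cases ha : a ≠ 0
    · simp only [if_pos ha]
      rw [List.reverse_cons]
      conv_lhs => rw [hfun]
      rw [ih (k+1), hsingle, if_pos ha]
      have : k + ((a :: t).length : Int) - k = 1 + (t.length : Int) := by simp; omega
      rw [this]
    · simp only [if_neg ha]
      conv_lhs => rw [hfun]
      rw [ih (k+1), hsingle, if_neg ha, List.append_nil]

-- ===== VERDICT (by name: the statement is the Claim_ definition above) =====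
theorem polyNomenclature_spec : Claim_equal_polyNomenclature := by
  intro entrada _
  unfold Spec_polyNomenclature polyNomenclature polyNomenclature_alt
  simp only []
  -- A's loop, rewritten over entrada.reverse with unified terms
  have hloop : (PySem.List.pyRange 1 ((entrada.length : Int) + 1) 1).foldl
      (fun r i => if ((PySem.List.pyGet? entrada (-i)).getD 0) ≠ 0 then
          if i = 1 then r ++ "+x" else r ++ ("+x" ++ pvPrintUnicodeExp i) else r) "1"
      = (PySem.List.pyRange 1 (1 + (entrada.reverse.length : Int)) 1).foldl
      (fun r i => if entrada.reverse.getD (i - 1).toNat 0 ≠ 0 then r ++ ("+" ++ pvTerm i) else r) "1" := by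
    have hb : (entrada.length : Int) + 1 = 1 + (entrada.reverse.length : Int) := by
      simp; omega
    rw [hb]
    apply PySem.List.foldl_congr_mem
    intro acc i hi
    have hmem := (PySem.List.mem_pyRange_one).mp hi
    have h1 : 1 ≤ i := hmem.1
    have h2 : i ≤ entrada.length := by
      have := hmem.2
      simp at this
      omega
    rw [negIndex_eq entrada i h1 h2]
    by_cases hc : entrada.reverse.getD (i - 1).toNat 0 ≠ 0
    · rw [if_pos hc, if_pos hc, ← term_eq i h1]
      by_cases hi1 : i = 1 <;> simp [hi1]
    · rw [if_neg hc, if_neg hc]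
  rw [hloop, main_loop entrada.reverse 1 "1" le_rfl]
  -- B's joined term list, unfolded into the same shape
  have hB : PySem.Str.join "+"
      ("1" :: ((((PySem.List.enumerate entrada 0).filterMap
          (fun p => if p.2 ≠ 0 then some ((entrada.length : Int) - p.1) else none)).reverse
        ++ [(entrada.length : Int) + 1]).map pvTerm))
      = ("1" ++ String.join ((PySem.List.enumerate entrada.reverse 1).filterMap
          (fun p => if p.2 ≠ 0 then some ("+" ++ pvTerm p.1) else none)))
        ++ ("+" ++ pvTerm ((entrada.length : Int) + 1)) := by
    rw [joinPlus]
    rw [List.map_append, List.map_append, List.map_map, List.map_map,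
      List.map_cons, List.map_nil, join_append_one]
    have hrev : ((PySem.List.enumerate entrada 0).filterMap
        (fun p => if p.2 ≠ 0 then some ((entrada.length : Int) - p.1) else none)).reverse
        = (PySem.List.enumerate entrada.reverse 1).filterMap
            (fun p => if p.2 ≠ 0 then some p.1 else none) := by
      have := revExps entrada 0
      simpa using this
    rw [hrev]
    have hmap : ((PySem.List.enumerate entrada.reverse 1).filterMap
          (fun p => if p.2 ≠ 0 then some p.1 else none)).map ((fun t => "+" ++ t) ∘ pvTerm)
        = (PySem.List.enumerate entrada.reverse 1).filterMap
            (fun p => if p.2 ≠ 0 then some ("+" ++ pvTerm p.1) else none) := by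
      rw [List.map_filterMap]
      rw [← List.map_filterMap, List.map_filterMap]
      congr 1
      funext p
      by_cases hp : p.2 ≠ 0 <;> simp [hp]
    rw [hmap]
    apply String.ext
    simp
  rw [hB]
  have hone : 1 ≤ (entrada.length : Int) + 1 := by omega
  rw [← term_eq ((entrada.length : Int) + 1) hone]
  split_ifs with hN
  · apply String.ext
    simp
  · apply String.ext
    simp
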